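-- pv_equiv track=rewrite | github.com/mouseos/optimod_to_stereotool_converter | orbf_to_sts.py | stereotool_to_dict
-- ===== SOURCE A (Python) =====
-- def stereotool_to_dict(input_string):
--     lines = input_string.strip().split('\n')
--     data_dict = {}
--     current_key = None
--
--     for line in lines:
--         if ("=" in line):
--             line = line.split("=")
--             if current_key not in data_dict:
--                 # Create an empty dictionary for the current key if it doesn't exist
--                 data_dict[current_key] = {}
--             data_dict[current_key][line[0]] = line[1]
--         else:
--             key_name = line.replace("[", "").replace("]", "")
--             current_key = key_name  # Update the current_key for subsequent lines
--
--     return data_dict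
-- ===== SOURCE B (Python) =====
-- def stereotool_to_dict(input_string):
--     lines = input_string.strip().split('\n')
--     # pass 1: segment the lines into (section_name, entry_lines) runs
--     sections = []
--     name = None
--     i = 0
--     n = len(lines)
--     while i < n:
--         j = i
--         while j < n and '=' in lines[j]:
--             j += 1
--         sections.append((name, lines[i:j]))
--         if j < n:
--             name = lines[j].replace('[', '').replace(']', '')
--             j += 1
--         i = j
--     # pass 2: fold the sections into the nested dict
--     result = {}
--     for name, entries in sections:
--         for entry in entries:
--             parts = entry.split('=')
--             result.setdefault(name, {})[parts[0]] = parts[1]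
--     return result
-- ===== Notes on version B (the rewrite author's own statement) =====
-- stated objective: alternative
-- what changed: A builds the nested dict in one interleaved pass tracking a current-section key; B first segments the lines into (section name, entry-line run) pairs with a run-taking index loop, then folds the section list into the dict in a second pass.
-- outside the precondition, e.g. on stereotool_to_dict('a=b'): A returns {None: {'a': 'b'}}, B returns {None: {'a': 'b'}}; on stereotool_to_dict('='): A returns {None: {'': ''}}, B returns {None: {'': ''}}
import Mathlib
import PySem

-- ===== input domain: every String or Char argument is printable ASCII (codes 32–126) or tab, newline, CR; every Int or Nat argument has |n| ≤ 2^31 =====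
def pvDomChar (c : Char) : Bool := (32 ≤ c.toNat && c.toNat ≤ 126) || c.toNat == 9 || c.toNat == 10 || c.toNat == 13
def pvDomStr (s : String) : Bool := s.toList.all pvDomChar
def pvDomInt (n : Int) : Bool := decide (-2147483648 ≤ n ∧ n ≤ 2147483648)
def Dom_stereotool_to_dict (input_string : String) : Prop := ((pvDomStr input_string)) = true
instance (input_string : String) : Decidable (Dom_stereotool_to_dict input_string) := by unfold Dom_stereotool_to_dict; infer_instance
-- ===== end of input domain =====

-- B replaces A's interleaved single pass by a two-pass 'segment then build' decomposition
-- (pass 1 splits the lines into (section name, entry-line run) pairs, pass 2 folds them into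
-- the dict); objective: alternative decomposition, same cost.

-- shared small helpers: '"=" in line' and the bracket-stripped header name
def pvHasEq (l : String) : Bool := PySem.Str.isIn "=" l
def pvHeaderName (l : String) : String :=
  PySem.Str.replace (PySem.Str.replace l "[" "") "]" ""

-- ===== PORT A =====
-- A's dict is keyed by Option String (Python's None before any header); the final .map projects
-- the keys with getD "" to reach the declared String-keyed type — exact inside Pre_, where the
-- None key never receives an entry.  parts[0]/parts[1] are in range since '=' is in the line.
def pvStepA (st : PySem.Dict (Option String) (PySem.Dict String String) × Option String)
    (line : String) : PySem.Dict (Option String) (PySem.Dict String String) × Option String :=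
  if pvHasEq line then
    let parts := (PySem.Str.split? line "=").getD []
    let d := if st.1.contains st.2 then st.1 else st.1.insert st.2 PySem.Dict.empty
    (d.modify st.2 PySem.Dict.empty
      (fun inner => inner.insert ((PySem.List.pyGet? parts 0).getD "")
        ((PySem.List.pyGet? parts 1).getD "")), st.2)
  else
    (st.1, some (pvHeaderName line))

def stereotool_to_dict (input_string : String) : List (String × List (String × String)) :=
  ((((PySem.Str.split? (PySem.Str.strip input_string) "\n").getD []).foldl
      pvStepA (PySem.Dict.empty, none)).1).items.map
    (fun p => (p.1.getD "", p.2.items))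

-- ===== PORT B =====
-- pass 1 of Source B: each outer-while step takes the maximal run of '='-lines (the inner while)
-- and then consumes the following header line, if any
def pvSegment (name : Option String) (lines : List String) :
    List (Option String × List String) :=
  let es := lines.takeWhile pvHasEq
  match hm : lines.dropWhile pvHasEq with
  | [] => [(name, es)]
  | hline :: t => (name, es) :: pvSegment (some (pvHeaderName hline)) t
termination_by lines.length
decreasing_by
  have h1 : (lines.dropWhile pvHasEq).length ≤ lines.length := List.length_dropWhile_le _ _
  rw [hm] at h1; simp at h1; omega

-- pass 2 of Source B: result.setdefault(name, {})[parts[0]] = parts[1] for each entry line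
def pvBuild (sections : List (Option String × List String)) :
    PySem.Dict (Option String) (PySem.Dict String String) :=
  sections.foldl
    (fun d sec =>
      sec.2.foldl
        (fun d entry =>
          let parts := (PySem.Str.split? entry "=").getD []
          (d.setdefault sec.1 PySem.Dict.empty).modify sec.1 PySem.Dict.empty
            (fun inner => inner.insert ((PySem.List.pyGet? parts 0).getD "")
              ((PySem.List.pyGet? parts 1).getD "")))
        d)
    PySem.Dict.empty

def stereotool_to_dict_alt (input_string : String) : List (String × List (String × String)) :=
  (pvBuild (pvSegment none
      ((PySem.Str.split? (PySem.Str.strip input_string) "\n").getD []))).items.map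
    (fun p => (p.1.getD "", p.2.items))

-- ===== PRECONDITION & SPEC =====
-- Pre_ excludes inputs whose first stripped line contains '=': on those A returns a dict whose
-- outer key is Python's None — not a value of the declared str-keyed dict type, unrepresentable
-- as a String key.
def Pre_stereotool_to_dict (input_string : String) : Prop :=
  pvHasEq ((((PySem.Str.split? (PySem.Str.strip input_string) "\n")).getD []).headD "") = false
instance (input_string : String) : Decidable (Pre_stereotool_to_dict input_string) := by
  unfold Pre_stereotool_to_dict; infer_instance

def pvWitness_stereotool_to_dict : String := "[A]\nx=1\ny=2\n[B]\nx=3"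

def Spec_stereotool_to_dict (input_string : String) (out : List (String × List (String × String))) : Prop := out = stereotool_to_dict_alt input_string
instance (input_string : String) (out : List (String × List (String × String))) : Decidable (Spec_stereotool_to_dict input_string out) := by unfold Spec_stereotool_to_dict; infer_instance

-- ===== CLAIM (what is proved, stated in full; the proofs are below) =====
def Claim_equal_stereotool_to_dict : Prop := ∀ (input_string : String), Dom_stereotool_to_dict input_string → Pre_stereotool_to_dict input_string → Spec_stereotool_to_dict input_string (stereotool_to_dict input_string)

-- ===== LEMMAS AND PROOFS =====

-- the per-entry insertion shared by A's '='-branch and B's pass-2 body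
def pvIns (d : PySem.Dict (Option String) (PySem.Dict String String)) (ck : Option String)
    (line : String) : PySem.Dict (Option String) (PySem.Dict String String) :=
  let parts := (PySem.Str.split? line "=").getD []
  (d.setdefault ck PySem.Dict.empty).modify ck PySem.Dict.empty
    (fun inner => inner.insert ((PySem.List.pyGet? parts 0).getD "")
      ((PySem.List.pyGet? parts 1).getD ""))

-- B's pass 2 started from an arbitrary dict
def pvBuildFrom (sections : List (Option String × List String))
    (d : PySem.Dict (Option String) (PySem.Dict String String)) :
    PySem.Dict (Option String) (PySem.Dict String String) :=
  sections.foldl (fun d sec => sec.2.foldl (fun d entry => pvIns d sec.1 entry) d) d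

theorem pvBuild_eq_buildFrom (sections : List (Option String × List String)) :
    pvBuild sections = pvBuildFrom sections PySem.Dict.empty := rfl

theorem pvStepA_pos (d : PySem.Dict (Option String) (PySem.Dict String String))
    (ck : Option String) (line : String) (h : pvHasEq line = true) :
    pvStepA (d, ck) line = (pvIns d ck line, ck) := by
  by_cases hc : d.contains ck = true
  · simp [pvStepA, pvIns, h, hc, PySem.Dict.setdefault]
  · simp [pvStepA, pvIns, h, hc, PySem.Dict.setdefault, PySem.Dict.insert]

theorem pvStepA_neg (d : PySem.Dict (Option String) (PySem.Dict String String))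
    (ck : Option String) (line : String) (h : pvHasEq line = false) :
    pvStepA (d, ck) line = (d, some (pvHeaderName line)) := by
  simp [pvStepA, h]

-- non-dependent unfolding of pvSegment
theorem pvSegment_eq (name : Option String) (lines : List String) :
    pvSegment name lines =
      match lines.dropWhile pvHasEq with
      | [] => [(name, lines.takeWhile pvHasEq)]
      | hline :: t =>
          (name, lines.takeWhile pvHasEq) :: pvSegment (some (pvHeaderName hline)) t := by
  rw [pvSegment]
  split
  · rename_i heq; rw [heq]
  · rename_i hline t heq; rw [heq]

-- the sections after the current one depend only on the lines
def pvRest (lines : List String) : List (Option String × List String) :=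
  match lines.dropWhile pvHasEq with
  | [] => []
  | hline :: t => pvSegment (some (pvHeaderName hline)) t

theorem pvSegment_char (name : Option String) (lines : List String) :
    pvSegment name lines = (name, lines.takeWhile pvHasEq) :: pvRest lines := by
  rw [pvSegment_eq]
  cases hdw : lines.dropWhile pvHasEq <;> simp [pvRest, hdw]

theorem pvRest_cons_pos (l : String) (ls : List String) (h : pvHasEq l = true) :
    pvRest (l :: ls) = pvRest ls := by
  simp [pvRest, List.dropWhile_cons_of_pos h]

theorem pvSegment_cons_neg (ck : Option String) (l : String) (ls : List String)
    (h : pvHasEq l = false) :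
    pvSegment ck (l :: ls) = (ck, []) :: pvSegment (some (pvHeaderName l)) ls := by
  have h' : ¬ pvHasEq l = true := by simp [h]
  rw [pvSegment_eq ck (l :: ls)]
  simp only [List.takeWhile_cons_of_neg h', List.dropWhile_cons_of_neg h']

-- main invariant: A's interleaved fold from any state = B's build over the segmentation
theorem pvLoop_eq (lines : List String)
    (d : PySem.Dict (Option String) (PySem.Dict String String)) (ck : Option String) :
    (lines.foldl pvStepA (d, ck)).1 = pvBuildFrom (pvSegment ck lines) d := by
  induction lines generalizing d ck with
  | nil => rw [pvSegment_char]; simp [pvBuildFrom, pvRest]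
  | cons l ls ih =>
    by_cases h : pvHasEq l = true
    · rw [List.foldl_cons, pvStepA_pos d ck l h, ih,
        pvSegment_char ck (l :: ls), pvSegment_char ck ls, pvRest_cons_pos l ls h]
      simp [pvBuildFrom, List.takeWhile_cons_of_pos h]
    · have h' : pvHasEq l = false := by simpa using h
      rw [List.foldl_cons, pvStepA_neg d ck l h', ih, pvSegment_cons_neg ck l ls h']
      simp [pvBuildFrom]

-- ===== VERDICT (by name: the statement is the Claim_ definition above) =====
theorem stereotool_to_dict_spec : Claim_equal_stereotool_to_dict := by
  intro s _ _
  unfold Spec_stereotool_to_dict stereotool_to_dict stereotool_to_dict_alt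
  rw [pvLoop_eq, pvBuild_eq_buildFrom]
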